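-- pv_equiv track=rewrite | github.com/koki-sonnenburg/ddueruem | utils/AST.py | find_group_start
-- ===== SOURCE A (Python) =====
-- def find_group_start(start, depth, tokens):
--
--     end = -1
--     for i in reversed(range(0, start + 1)):
--         d, t, c = tokens[i]
--
--         if d > 0:
--             continue
--
--         if t == "VAR" or t == "LFT":
--             return i
--
--         if t in ["OR", "AND", "IMP", "EQV"]:
--             return i + 1
--
--
--     return 0
-- ===== SOURCE B (Python) =====
-- def find_group_start(start, depth, tokens):
--     # forward single pass: the last qualifying index overwrites, matching A's
--     # backward first-hit
--     result = 0
--     for i in range(0, start + 1):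
--         d, t, c = tokens[i]
--         if d > 0:
--             continue
--         if t == "VAR" or t == "LFT":
--             result = i
--         elif t in ("OR", "AND", "IMP", "EQV"):
--             result = i + 1
--     return result
-- ===== Notes on version B (the rewrite author's own statement) =====
-- stated objective: alternative
-- what changed: Replaces the backward scan with early return by a forward single pass keeping an accumulator that is overwritten by the last qualifying index.
import Mathlib
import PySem

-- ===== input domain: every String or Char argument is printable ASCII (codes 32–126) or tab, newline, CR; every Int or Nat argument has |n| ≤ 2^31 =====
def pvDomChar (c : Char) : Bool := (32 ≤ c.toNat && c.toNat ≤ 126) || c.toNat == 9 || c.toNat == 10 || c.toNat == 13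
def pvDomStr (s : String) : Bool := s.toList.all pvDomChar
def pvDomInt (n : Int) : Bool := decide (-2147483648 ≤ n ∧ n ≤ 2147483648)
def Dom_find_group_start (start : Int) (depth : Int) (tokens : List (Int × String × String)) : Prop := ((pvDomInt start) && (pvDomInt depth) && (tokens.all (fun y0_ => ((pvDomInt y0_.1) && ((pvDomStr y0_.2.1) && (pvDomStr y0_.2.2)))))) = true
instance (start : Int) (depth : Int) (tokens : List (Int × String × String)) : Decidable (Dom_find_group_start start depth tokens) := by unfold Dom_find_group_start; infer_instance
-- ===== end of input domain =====

-- B changes the decomposition: a forward single pass with an overwritten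
-- accumulator instead of A's backward scan with early return (same cost).

-- ===== PORT A =====
-- A's loop body: scan the (reversed) index list, returning at the first hit;
-- a `none` from pyGet? is Python's IndexError (excluded by Pre_).
def fgsLoopA (tokens : List (Int × String × String)) : List Int → Int
  | [] => 0
  | i :: rest =>
    match PySem.List.pyGet? tokens i with
    | none => 0
    | some (d, t, _c) =>
      if d > 0 then fgsLoopA tokens rest
      else if t = "VAR" ∨ t = "LFT" then i
      else if t = "OR" ∨ t = "AND" ∨ t = "IMP" ∨ t = "EQV" then i + 1
      else fgsLoopA tokens rest

def find_group_start (start : Int) (depth : Int) (tokens : List (Int × String × String)) : Int :=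
  fgsLoopA tokens (PySem.List.pyRange 0 (start + 1) 1).reverse

-- ===== PORT B =====
def find_group_start_alt (start : Int) (depth : Int) (tokens : List (Int × String × String)) : Int :=
  (PySem.List.pyRange 0 (start + 1) 1).foldl (fun result i =>
    match PySem.List.pyGet? tokens i with
    | none => result
    | some (d, t, _c) =>
      if d > 0 then result
      else if t = "VAR" ∨ t = "LFT" then i
      else if t = "OR" ∨ t = "AND" ∨ t = "IMP" ∨ t = "EQV" then i + 1
      else result) 0

-- ===== PRECONDITION & SPEC =====
-- Pre_ excludes exactly the inputs where A raises IndexError (start ≥ len(tokens)).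
def Pre_find_group_start (start : Int) (depth : Int) (tokens : List (Int × String × String)) : Prop :=
  start < (tokens.length : Int)
instance (start : Int) (depth : Int) (tokens : List (Int × String × String)) : Decidable (Pre_find_group_start start depth tokens) := by unfold Pre_find_group_start; infer_instance

def pvWitness_find_group_start : Int × Int × (List (Int × String × String)) :=
  (2, 0, [(0, "VAR", "x"), (0, "OR", "|"), (1, "VAR", "y")])

def Spec_find_group_start (start : Int) (depth : Int) (tokens : List (Int × String × String)) (out : Int) : Prop := out = find_group_start_alt start depth tokens
instance (start : Int) (depth : Int) (tokens : List (Int × String × String)) (out : Int) : Decidable (Spec_find_group_start start depth tokens out) := by unfold Spec_find_group_start; infer_instance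

-- ===== CLAIM (what is proved, stated in full; the proofs are below) =====
def Claim_equal_find_group_start : Prop := ∀ (start : Int) (depth : Int) (tokens : List (Int × String × String)), Dom_find_group_start start depth tokens → Pre_find_group_start start depth tokens → Spec_find_group_start start depth tokens (find_group_start start depth tokens)

-- ===== LEMMAS AND PROOFS =====

-- classification of index i: `some v` iff the loop body would return v at i
def fgsHit (tokens : List (Int × String × String)) (i : Int) : Option Int :=
  match PySem.List.pyGet? tokens i with
  | none => none
  | some (d, t, _c) =>
    if d > 0 then none
    else if t = "VAR" ∨ t = "LFT" then some i
    else if t = "OR" ∨ t = "AND" ∨ t = "IMP" ∨ t = "EQV" then some (i + 1)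
    else none

theorem fgsLoopA_eq_findSome (tokens : List (Int × String × String)) (l : List Int)
    (h : ∀ i ∈ l, (PySem.List.pyGet? tokens i).isSome) :
    fgsLoopA tokens l = (l.findSome? (fgsHit tokens)).getD 0 := by
  induction l with
  | nil => simp [fgsLoopA]
  | cons i rest ih =>
    have hi := h i (by simp)
    obtain ⟨⟨d, t, c⟩, hget⟩ := Option.isSome_iff_exists.mp hi
    have hrest := ih (fun j hj => h j (by simp [hj]))
    simp only [fgsLoopA, List.findSome?, fgsHit, hget]
    split_ifs with h1 h2 h3 <;> simp [hrest]

theorem foldl_eq_findSome (tokens : List (Int × String × String)) (l : List Int) (acc : Int)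
    (h : ∀ i ∈ l, (PySem.List.pyGet? tokens i).isSome) :
    l.foldl (fun result i =>
      match PySem.List.pyGet? tokens i with
      | none => result
      | some (d, t, _c) =>
        if d > 0 then result
        else if t = "VAR" ∨ t = "LFT" then i
        else if t = "OR" ∨ t = "AND" ∨ t = "IMP" ∨ t = "EQV" then i + 1
        else result) acc
    = (l.reverse.findSome? (fgsHit tokens)).getD acc := by
  induction l generalizing acc with
  | nil => simp
  | cons i rest ih =>
    have hi := h i (by simp)
    obtain ⟨⟨d, t, c⟩, hget⟩ := Option.isSome_iff_exists.mp hi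
    have hrest := fun a => ih a (fun j hj => h j (by simp [hj]))
    simp only [List.foldl_cons, List.reverse_cons, List.findSome?_append]
    rw [hrest]
    cases hfs : rest.reverse.findSome? (fgsHit tokens) with
    | some v => simp
    | none =>
      have hhit : fgsHit tokens i
          = if d > 0 then none
            else if t = "VAR" ∨ t = "LFT" then some i
            else if t = "OR" ∨ t = "AND" ∨ t = "IMP" ∨ t = "EQV" then some (i + 1)
            else none := by
        simp [fgsHit, hget]
      have hsingle : List.findSome? (fgsHit tokens) [i] = fgsHit tokens i := by
        cases hv : fgsHit tokens i <;> simp [List.findSome?, hv]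
      rw [Option.none_or, hsingle, hget, hhit]
      split_ifs <;> simp_all

theorem find_group_start_spec : Claim_equal_find_group_start := by
  intro start depth tokens _hdom hpre
  unfold Spec_find_group_start find_group_start find_group_start_alt
  have h : ∀ i ∈ PySem.List.pyRange 0 (start + 1) 1, (PySem.List.pyGet? tokens i).isSome := by
    intro i hi
    rw [PySem.List.mem_pyRange_one] at hi
    unfold Pre_find_group_start at hpre
    have hlt : i.toNat < tokens.length := by omega
    have hnn : (0:Int) ≤ i := by omega
    rw [PySem.List.pyGet?_of_nonneg tokens hnn]
    simp [hlt]
  rw [fgsLoopA_eq_findSome tokens _ (by intro i hi; exact h i (List.mem_reverse.mp hi)),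
      foldl_eq_findSome tokens _ 0 h]
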